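-- pv_equiv track=rewrite | github.com/uk2459644/dsa-practice | gfg/tags/dp/basic/sort-arr.py | countSortedArray
-- ===== SOURCE A (Python) =====
-- def countSortedArray(start,m,size,n):
--     # If size becomes equal to m that means an array is found
--     if size == m:
--         return 1
--
--     if start>n:
--         return 0
--
--     notTaken,taken=0,0
--     # include current element, increase size by 1 and remain on the same
--     # element as it can be included again
--     taken=countSortedArray(start,m,size+1,n)
--     # exclude current element
--     notTaken=countSortedArray(start+1,m,size,n)
--
--     return taken+notTaken
-- ===== SOURCE B (Python) =====
-- def countSortedArray(start, m, size, n):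
--     if size == m:
--         return 1
--     if start > n:
--         return 0
--     k = m - size          # remaining slots
--     v = n - start + 1     # available values
--     # multisets of size k from v values: C(v + k - 1, k), computed incrementally
--     num = 1
--     for i in range(1, k + 1):
--         num = num * (v + i - 1) // i
--     return num
-- ===== Notes on version B (the rewrite author's own statement) =====
-- stated objective: alternative
-- what changed: Replaces the include/exclude recursion by the closed-form stars-and-bars count C((n-start+1)+(m-size)-1, m-size), computed with one incremental product loop.
import Mathlib
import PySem

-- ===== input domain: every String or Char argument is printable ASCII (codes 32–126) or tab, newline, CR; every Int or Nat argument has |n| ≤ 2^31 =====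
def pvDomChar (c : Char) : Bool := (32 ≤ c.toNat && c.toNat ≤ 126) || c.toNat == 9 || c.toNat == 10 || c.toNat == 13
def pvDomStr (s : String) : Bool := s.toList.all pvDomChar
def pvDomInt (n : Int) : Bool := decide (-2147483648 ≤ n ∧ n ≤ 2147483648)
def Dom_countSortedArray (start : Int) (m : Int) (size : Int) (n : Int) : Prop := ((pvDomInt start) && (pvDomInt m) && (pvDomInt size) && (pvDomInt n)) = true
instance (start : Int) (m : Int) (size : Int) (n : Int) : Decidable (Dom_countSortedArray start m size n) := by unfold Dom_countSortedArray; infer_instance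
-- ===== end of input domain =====

-- B replaces A's include/exclude recursion by the closed-form stars-and-bars
-- count C((n-start+1)+(m-size)-1, m-size) computed with one product loop.


-- ===== PORT A =====
-- literal transliteration; the 'm < size' guard only makes the definition total:
-- there the Python recursion diverges (RecursionError), which Pre_ excludes.
def countSortedArray (start : Int) (m : Int) (size : Int) (n : Int) : Int :=
  if size = m then 1
  else if start > n then 0
  else if m < size then 0   -- totality guard, outside Pre_
  else
    let taken := countSortedArray start m (size + 1) n
    let notTaken := countSortedArray (start + 1) m size n
    taken + notTaken
termination_by ((m - size) + (n - start + 1)).toNat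
decreasing_by all_goals omega

-- ===== PORT B =====
def countSortedArray_alt (start : Int) (m : Int) (size : Int) (n : Int) : Int :=
  if size = m then 1
  else if start > n then 0
  else
    let k := m - size
    let v := n - start + 1
    (PySem.List.pyRange 1 (k + 1) 1).foldl
      (fun num i => PySem.Int.floordiv (num * (v + i - 1)) i) 1

-- ===== PRECONDITION & SPEC =====
-- When size > m and start ≤ n, Python A recurses with ever-growing size and raises
-- RecursionError; Pre_ excludes exactly those inputs (everywhere else A returns).
def Pre_countSortedArray (start : Int) (m : Int) (size : Int) (n : Int) : Prop :=
  size ≤ m ∨ n < start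
instance (start : Int) (m : Int) (size : Int) (n : Int) : Decidable (Pre_countSortedArray start m size n) := by unfold Pre_countSortedArray; infer_instance
def pvWitness_countSortedArray : Int × Int × Int × Int := (1, 3, 0, 4)

def Spec_countSortedArray (start : Int) (m : Int) (size : Int) (n : Int) (out : Int) : Prop := out = countSortedArray_alt start m size n
instance (start : Int) (m : Int) (size : Int) (n : Int) (out : Int) : Decidable (Spec_countSortedArray start m size n out) := by unfold Spec_countSortedArray; infer_instance

-- ===== CLAIM (what is proved, stated in full; the proofs are below) =====
def Claim_equal_countSortedArray : Prop := ∀ (start : Int) (m : Int) (size : Int) (n : Int), Dom_countSortedArray start m size n → Pre_countSortedArray start m size n → Spec_countSortedArray start m size n (countSortedArray start m size n)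

-- ===== LEMMAS AND PROOFS =====

-- multiset count M(v, k) = C(v + k - 1, k) (Nat subtraction; M(0,0)=1, M(0,k+1)=0)
def multisetCount (v k : Nat) : Nat := (v + k - 1).choose k

theorem multisetCount_zero (v : Nat) : multisetCount v 0 = 1 := by
  simp [multisetCount]

theorem multisetCount_zero_left (k : Nat) : multisetCount 0 (k + 1) = 0 := by
  simp [multisetCount]

theorem multisetCount_pascal (v k : Nat) :
    multisetCount (v + 1) (k + 1) = multisetCount (v + 1) k + multisetCount v (k + 1) := by
  unfold multisetCount
  have h1 : v + 1 + (k + 1) - 1 = (v + k) + 1 := by omega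
  have h2 : v + 1 + k - 1 = v + k := by omega
  have h3 : v + (k + 1) - 1 = v + k := by omega
  rw [h1, h2, h3, Nat.choose_succ_succ]

-- A computes the multiset count whenever size ≤ m
theorem countSortedArray_eq_multisetCount (start m size n : Int) (h : size ≤ m) :
    countSortedArray start m size n
      = ((multisetCount (n - start + 1).toNat (m - size).toNat : Nat) : Int) := by
  rw [countSortedArray]
  split
  · rename_i hsm
    subst hsm
    simp [multisetCount_zero]
  · rename_i hsm
    split
    · rename_i hgt
      have hv : (n - start + 1).toNat = 0 := by omega
      have hk : ∃ k, (m - size).toNat = k + 1 := ⟨(m - size).toNat - 1, by omega⟩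
      obtain ⟨k, hk⟩ := hk
      rw [hv, hk, multisetCount_zero_left]
      simp
    · rename_i hle
      have hms : ¬ m < size := by omega
      simp only [if_neg hms]
      have ih1 := countSortedArray_eq_multisetCount start m (size + 1) n (by omega)
      have ih2 := countSortedArray_eq_multisetCount (start + 1) m size n (by omega)
      rw [ih1, ih2]
      have hv : (n - start + 1).toNat = (n - (start + 1) + 1).toNat + 1 := by omega
      have hk : (m - size).toNat = (m - (size + 1)).toNat + 1 := by omega
      rw [hv, hk]
      rw [multisetCount_pascal]
      push_cast
      ring
termination_by ((m - size) + (n - start + 1)).toNat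
decreasing_by all_goals omega

-- B's product loop computes the multiset count: after i steps the accumulator is C(v - 1 + i, i)
theorem loop_eq_choose (v : Int) (hv : 1 ≤ v) (k : Nat) :
    (PySem.List.pyRange 1 ((k : Int) + 1) 1).foldl
      (fun num i => PySem.Int.floordiv (num * (v + i - 1)) i) 1
      = (((v.toNat - 1 + k).choose k : Nat) : Int) := by
  induction k with
  | zero => simp [PySem.List.pyRange_one_eq_nil]
  | succ k ih =>
    have hcast : (((k : Nat) + 1 : Nat) : Int) = (k : Int) + 1 := by push_cast; ring
    rw [hcast]
    have hsplit : PySem.List.pyRange 1 ((k : Int) + 1 + 1) 1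
        = PySem.List.pyRange 1 ((k : Int) + 1) 1 ++ [(k : Int) + 1] :=
      PySem.List.pyRange_one_succ_right (by omega)
    rw [hsplit, List.foldl_append, ih]
    simp only [List.foldl_cons, List.foldl_nil]
    -- goal: floordiv (choose * (v + (k+1) - 1)) (k+1) = choose(v-1+(k+1), k+1)
    have hkey : ((v.toNat - 1 + k).choose k : Int) * (v + ((k : Int) + 1) - 1)
        = (((v.toNat - 1 + (k + 1)).choose (k + 1) : Nat) : Int) * ((k : Int) + 1) := by
      have hvk : v + ((k : Int) + 1) - 1 = (((v.toNat - 1 + k) + 1 : Nat) : Int) := by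
        push_cast; omega
      rw [hvk]
      have hkey' : (v.toNat - 1 + k).choose k * (v.toNat - 1 + k + 1)
          = (v.toNat - 1 + (k + 1)).choose (k + 1) * (k + 1) := by
        have h := Nat.add_one_mul_choose_eq (v.toNat - 1 + k) k
        rw [Nat.mul_comm]
        exact h
      exact_mod_cast hkey'
    rw [hkey]
    have hpos : (0 : Int) < (k : Int) + 1 := by positivity
    rw [PySem.Int.floordiv_eq_ediv_of_pos hpos, Int.mul_ediv_cancel _ (by omega)]

theorem alt_eq_multisetCount (start m size n : Int) (h : size ≤ m) :
    countSortedArray_alt start m size n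
      = ((multisetCount (n - start + 1).toNat (m - size).toNat : Nat) : Int) := by
  unfold countSortedArray_alt
  split
  · rename_i hsm; subst hsm; simp [multisetCount_zero]
  · rename_i hsm
    split
    · rename_i hgt
      have hv : (n - start + 1).toNat = 0 := by omega
      obtain ⟨k, hk⟩ : ∃ k, (m - size).toNat = k + 1 := ⟨(m - size).toNat - 1, by omega⟩
      rw [hv, hk, multisetCount_zero_left]
      simp
    · rename_i hle
      have hv : 1 ≤ n - start + 1 := by omega
      have hk : (m - size) = (((m - size).toNat : Nat) : Int) := by omega
      rw [hk]
      rw [loop_eq_choose (n - start + 1) hv (m - size).toNat]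
      unfold multisetCount
      congr 2
      omega

-- ===== VERDICT (by name: the statement is the Claim_ definition above) =====
theorem countSortedArray_spec : Claim_equal_countSortedArray := by
  intro start m size n _ hpre
  unfold Spec_countSortedArray
  by_cases h : size ≤ m
  · rw [countSortedArray_eq_multisetCount start m size n h,
        alt_eq_multisetCount start m size n h]
  · have hgt : n < start := by
      rcases hpre with h' | h'
      · omega
      · exact h'
    have hne : size ≠ m := by omega
    -- (size > m here)
    rw [countSortedArray]
    unfold countSortedArray_alt
    simp [hne, hgt]
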